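-- pv_equiv track=rewrite | github.com/ahundt/autorun | plugins/autorun/src/autorun/main.py | sanitize_log_message
-- ===== SOURCE A (Python) =====
-- def sanitize_log_message(message: str, max_length: int = 10000) -> str:
--     """Sanitize message for safe logging - prevents log injection attacks.
--
--     Security: Untrusted data (transcripts, prompts, model outputs) must be
--     sanitized before logging to prevent log injection via embedded newlines.
--
--     Args:
--         message: Raw message string (may contain newlines, control chars)
--         max_length: Maximum message length (truncates if exceeded)
--
--     Returns:
--         Sanitized string safe for single-line log entry
--     """
--     if not isinstance(message, str):
--         message = str(message)
--     # Replace newlines and carriage returns with escaped versions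
--     message = message.replace('\r\n', '\\r\\n').replace('\n', '\\n').replace('\r', '\\r')
--     # Replace other control characters that could affect log parsing
--     message = ''.join(c if c.isprintable() or c == ' ' else f'\\x{ord(c):02x}' for c in message)
--     # Truncate excessively long messages
--     if len(message) > max_length:
--         message = message[:max_length] + "... (truncated)"
--     return message
-- ===== SOURCE B (Python) =====
-- def sanitize_log_message(message, max_length=10000):
--     if not isinstance(message, str):
--         message = str(message)
--     parts = []
--     for c in message:
--         if c == '\n':
--             parts.append('\\n')
--         elif c == '\r':
--             parts.append('\\r')
--         elif c.isprintable() or c == ' ':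
--             parts.append(c)
--         else:
--             parts.append(f'\\x{ord(c):02x}')
--     result = ''.join(parts)
--     if len(result) > max_length:
--         result = result[:max_length] + "... (truncated)"
--     return result
-- ===== Notes on version B (the rewrite author's own statement) =====
-- stated objective: alternative
-- what changed: Replaces A's three sequential str.replace passes plus a per-character comprehension pass with a single character loop that escapes \n, \r and control characters in one traversal.
import Mathlib
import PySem

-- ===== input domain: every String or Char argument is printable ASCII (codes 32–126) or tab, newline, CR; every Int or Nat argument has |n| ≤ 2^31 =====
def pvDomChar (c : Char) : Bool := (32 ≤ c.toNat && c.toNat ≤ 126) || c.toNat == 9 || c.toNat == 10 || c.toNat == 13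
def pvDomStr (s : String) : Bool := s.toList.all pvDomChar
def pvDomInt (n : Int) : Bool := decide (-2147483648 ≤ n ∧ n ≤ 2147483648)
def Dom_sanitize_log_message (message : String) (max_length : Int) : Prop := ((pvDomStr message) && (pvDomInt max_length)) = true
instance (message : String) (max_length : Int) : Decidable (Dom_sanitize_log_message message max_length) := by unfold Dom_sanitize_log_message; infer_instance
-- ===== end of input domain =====

-- B replaces A's three sequential str.replace passes plus a per-character comprehension
-- pass with a single character loop escaping \n, \r and control chars in one traversal.

-- shared helpers (both Pythons call the same built-ins):
-- c.isprintable(): exact for ASCII code points (codes 32–126; space is printable)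
def pyPrintable (c : Char) : Bool := 32 ≤ c.toNat && c.toNat ≤ 126
def hexDigit (n : Nat) : Char := if n < 10 then Char.ofNat (48 + n) else Char.ofNat (87 + n)
-- f'\x{ord(c):02x}': exact for code points < 256
def hexEsc (c : Char) : List Char :=
  ['\\', 'x', hexDigit (c.toNat / 16 % 16), hexDigit (c.toNat % 16)]

-- ===== PORT A =====
def sanitize_log_message (message : String) (max_length : Int) : String :=
  -- message.replace('\r\n','\\r\\n').replace('\n','\\n').replace('\r','\\r')
  let m1 := PySem.Chars.replace message.toList ['\r', '\n'] ['\\', 'r', '\\', 'n']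
  let m2 := PySem.Chars.replace m1 ['\n'] ['\\', 'n']
  let m3 := PySem.Chars.replace m2 ['\r'] ['\\', 'r']
  -- ''.join(c if c.isprintable() or c == ' ' else f'\\x{ord(c):02x}' for c in message)
  let m4 := m3.flatMap (fun c => if pyPrintable c || c = ' ' then [c] else hexEsc c)
  -- if len(message) > max_length: message = message[:max_length] + "... (truncated)"
  if max_length < (m4.length : Int) then
    String.ofList (PySem.List.slice m4 none (some max_length) ++ "... (truncated)".toList)
  else
    String.ofList m4

-- ===== PORT B =====
-- the body of B's single character loop (one parts.append per character)
def escChar (c : Char) : List Char :=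
  if c = '\n' then ['\\', 'n']
  else if c = '\r' then ['\\', 'r']
  else if pyPrintable c || c = ' ' then [c]
  else hexEsc c

def sanitize_log_message_alt (message : String) (max_length : Int) : String :=
  -- parts = []; for c in message: parts.append(…); result = ''.join(parts)
  let result := message.toList.flatMap escChar
  -- if len(result) > max_length: result = result[:max_length] + "... (truncated)"
  if max_length < (result.length : Int) then
    String.ofList (PySem.List.slice result none (some max_length) ++ "... (truncated)".toList)
  else
    String.ofList result

-- ===== PRECONDITION & SPEC =====
def Spec_sanitize_log_message (message : String) (max_length : Int) (out : String) : Prop := out = sanitize_log_message_alt message max_length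
instance (message : String) (max_length : Int) (out : String) : Decidable (Spec_sanitize_log_message message max_length out) := by unfold Spec_sanitize_log_message; infer_instance

-- ===== CLAIM (what is proved, stated in full; the proofs are below) =====
def Claim_equal_sanitize_log_message : Prop := ∀ (message : String) (max_length : Int), Dom_sanitize_log_message message max_length → Spec_sanitize_log_message message max_length (sanitize_log_message message max_length)

-- ===== LEMMAS AND PROOFS =====

-- what A's first replace ('\r\n' → '\\r\\n') computes, as a structural recursion
def escRN : List Char → List Char
  | '\r' :: '\n' :: t => '\\' :: 'r' :: '\\' :: 'n' :: escRN t
  | c :: t => c :: escRN t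
  | [] => []

-- Python str.replace with a single-character pattern is a per-character flatMap
theorem go_single (a : Char) (ns : List Char) :
    ∀ (fuel : Nat) (l acc : List Char), l.length ≤ fuel →
      PySem.Chars.replace.go [a] ns fuel l acc
        = acc.reverse ++ l.flatMap (fun c => if c = a then ns else [c]) := by
  intro fuel
  induction fuel with
  | zero =>
    intro l acc h
    have : l = [] := List.eq_nil_of_length_eq_zero (Nat.le_zero.mp h)
    subst this; simp [PySem.Chars.replace.go]
  | succ n ih =>
    intro l acc h
    cases l with
    | nil => simp [PySem.Chars.replace.go]
    | cons c t =>
      rw [PySem.Chars.replace.go]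
      by_cases hc : c = a
      · subst hc
        have hp : [c].isPrefixOf (c :: t) = true := by simp [List.isPrefixOf]
        rw [if_pos hp]
        have := ih t (ns.reverse ++ acc) (by simp at h; omega)
        simp only [List.length_cons, List.length_nil, Nat.zero_add, List.drop_one,
          List.tail_cons] at this ⊢
        rw [this]; simp
      · have hp : ¬ ([a].isPrefixOf (c :: t) = true) := by
          simp [List.isPrefixOf]; exact fun hh => hc hh.symm
        rw [if_neg hp]
        rw [ih t (c :: acc) (by simp at h; omega)]
        simp [hc]

theorem replace_single (cs : List Char) (a : Char) (ns : List Char) :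
    PySem.Chars.replace cs [a] ns = cs.flatMap (fun c => if c = a then ns else [c]) := by
  rw [PySem.Chars.replace]
  simp only [List.isEmpty_cons, Bool.false_eq_true, if_false]
  rw [go_single a ns cs.length cs [] (le_refl _)]
  simp

-- A's first replace is exactly escRN
theorem go_rn :
    ∀ (fuel : Nat) (l acc : List Char), l.length ≤ fuel →
      PySem.Chars.replace.go ['\r', '\n'] ['\\', 'r', '\\', 'n'] fuel l acc
        = acc.reverse ++ escRN l := by
  intro fuel
  induction fuel with
  | zero =>
    intro l acc h
    have : l = [] := List.eq_nil_of_length_eq_zero (Nat.le_zero.mp h)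
    subst this; simp [PySem.Chars.replace.go, escRN]
  | succ n ih =>
    intro l acc h
    cases l with
    | nil => simp [PySem.Chars.replace.go, escRN]
    | cons c t =>
      rw [PySem.Chars.replace.go]
      by_cases hpre : ['\r', '\n'].isPrefixOf (c :: t) = true
      · have hshape : c = '\r' ∧ ∃ t', t = '\n' :: t' := by
          cases t with
          | nil => simp [List.isPrefixOf] at hpre
          | cons d t' =>
            simp [List.isPrefixOf] at hpre
            exact ⟨hpre.1.symm, t', by rw [hpre.2]⟩
        obtain ⟨rfl, t', rfl⟩ := hshape
        rw [if_pos hpre]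
        have := ih t' (['\\', 'r', '\\', 'n'].reverse ++ acc) (by simp at h ⊢; omega)
        simp only [List.length_cons, List.drop_succ_cons, List.drop_zero,
          List.length_nil] at this ⊢
        rw [this, escRN.eq_1]
        simp
      · rw [if_neg hpre]
        rw [ih t (c :: acc) (by simp at h; omega)]
        have : escRN (c :: t) = c :: escRN t := by
          apply escRN.eq_2
          intro t1 hc ht
          apply hpre
          subst hc; subst ht
          simp [List.isPrefixOf]
        rw [this]; simp

-- per-character agreement of A's three-pass escaping with B's single-pass escape
theorem perchar (c : Char) :
    (((if c = '\n' then ['\\', 'n'] else [c]).flatMap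
        (fun d => if d = '\r' then ['\\', 'r'] else [d])).flatMap
          (fun d => if pyPrintable d || d = ' ' then [d] else hexEsc d)) = escChar c := by
  by_cases h1 : c = '\n'
  · subst h1; decide
  · by_cases h2 : c = '\r'
    · subst h2; decide
    · simp only [escChar, if_neg h1, if_neg h2, List.flatMap_cons, List.flatMap_nil,
        List.append_nil]

-- A's escaped-and-mapped string equals B's single pass
theorem core_eq (cs : List Char) :
    (((escRN cs).flatMap (fun c => if c = '\n' then ['\\', 'n'] else [c])).flatMap
        (fun c => if c = '\r' then ['\\', 'r'] else [c])).flatMap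
          (fun c => if pyPrintable c || c = ' ' then [c] else hexEsc c)
      = cs.flatMap escChar := by
  induction cs using escRN.induct with
  | case1 t ih =>
    rw [escRN.eq_1]
    simp only [List.flatMap_cons, List.flatMap_append, ih]
    simp [escChar, pyPrintable]
  | case2 c t hne ih =>
    rw [escRN.eq_2 c t (by intro t1 hc ht; exact hne t1 hc ht)]
    simp only [List.flatMap_cons, List.flatMap_append, ih, perchar]
  | case3 => simp [escRN]

-- ===== VERDICT (by name: the statement is the Claim_ definition above) =====
theorem sanitize_log_message_spec : Claim_equal_sanitize_log_message := by
  intro message max_length _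
  unfold Spec_sanitize_log_message sanitize_log_message sanitize_log_message_alt
  have hrn : PySem.Chars.replace message.toList ['\r', '\n'] ['\\', 'r', '\\', 'n']
      = escRN message.toList := by
    rw [PySem.Chars.replace]
    simp only [List.isEmpty_cons, Bool.false_eq_true, if_false]
    rw [go_rn _ _ [] (le_refl _)]; simp
  simp only [hrn, replace_single, core_eq]
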